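-- pv_equiv track=rewrite | github.com/xs0203401/yaohuangL-APAD | hw2/compute_highest_affinity.py | highest_affinity
-- ===== SOURCE A (Python) =====
-- def highest_affinity(site_list, user_list, time_list):
--     # Returned string pair should be ordered by dictionary order
--     # I.e., if the highest affinity pair is "foo" and "bar"
--     # return ("bar", "foo").
--
--     # dictionary key as websites
--     # values are the list of users
--     sites = {}
--     for n in range(len(site_list)):
--         if (site_list[n] not in sites):
--             sites[site_list[n]]=[]
--         sites[site_list[n]].append(user_list[n])
--
--     # make pairs for items in the dict
--     # and check users intersection
--     sites_items = tuple(sites.items())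
--     max_affinity_num = 0
--     max_affinity_pair = ['a','b']
--     for i in range(len(sites)):
--         for j in range(i+1, len(sites)):
--             affinity_num = len(set(sites_items[i][1]) & set(sites_items[j][1]))
--             # try to avoid using "intersection" operation:
--             # affinity_num = sum([1 for x in set(sites_items[j][1]) if x in sites_items[i][1]])
--             if (max_affinity_num < affinity_num):
--                 max_affinity_num = affinity_num
--                 max_affinity_pair = sorted([sites_items[i][0], sites_items[j][0]])
--
--     return (max_affinity_pair[0], max_affinity_pair[1])
-- ===== SOURCE B (Python) =====
-- def highest_affinity(site_list, user_list, time_list):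
--     # B: inverted-index approach — assign each site an index in first-occurrence
--     # order, track per user the distinct site indices visited, and count pair
--     # co-occurrences online; the final scan just reads the counter (no per-pair
--     # set intersections).
--     site_index = {}          # site name -> first-occurrence index
--     site_names = []          # index -> site name
--     user_sites = {}          # user -> distinct site indices visited
--     counter = {}             # (i, j) with i < j -> number of distinct common users
--     for site, user in zip(site_list, user_list):
--         i = site_index.get(site)
--         if i is None:
--             i = len(site_names)
--             site_index[site] = i
--             site_names.append(site)
--         seen = user_sites.get(user, [])
--         if i not in seen:
--             for j in seen:
--                 key = (j, i) if j < i else (i, j)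
--                 counter[key] = counter.get(key, 0) + 1
--             user_sites[user] = seen + [i]
--     best = 0
--     pair = ['a', 'b']
--     for i in range(len(site_names)):
--         for j in range(i + 1, len(site_names)):
--             c = counter.get((i, j), 0)
--             if best < c:
--                 best = c
--                 pair = sorted([site_names[i], site_names[j]])
--     return (pair[0], pair[1])
-- ===== Notes on version B (the rewrite author's own statement) =====
-- stated objective: faster
-- what changed: A intersects the user sets of every site pair (O(S^2*U) set work); B builds an inverted user->site-index map and counts pair co-occurrences online in one pass, so the final pair scan just reads a counter instead of computing intersections.
-- outside the precondition, e.g. on highest_affinity(['a', 'b'], ['u'], [0, 0]): A raises IndexError, B returns ('a', 'b')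
import Mathlib
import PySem

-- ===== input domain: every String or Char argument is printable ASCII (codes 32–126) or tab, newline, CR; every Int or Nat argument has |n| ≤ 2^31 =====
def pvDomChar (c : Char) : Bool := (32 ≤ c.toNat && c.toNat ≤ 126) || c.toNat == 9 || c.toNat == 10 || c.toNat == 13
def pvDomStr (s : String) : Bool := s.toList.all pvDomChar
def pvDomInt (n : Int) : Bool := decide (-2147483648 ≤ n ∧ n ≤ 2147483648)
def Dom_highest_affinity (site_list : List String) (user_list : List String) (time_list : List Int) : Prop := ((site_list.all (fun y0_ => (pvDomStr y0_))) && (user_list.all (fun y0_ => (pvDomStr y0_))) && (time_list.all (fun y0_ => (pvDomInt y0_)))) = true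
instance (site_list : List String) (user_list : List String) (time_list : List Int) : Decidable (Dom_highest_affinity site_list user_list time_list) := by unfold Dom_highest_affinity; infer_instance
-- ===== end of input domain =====

-- B replaces A's per-pair set intersections by an inverted user→site-indices index with
-- online co-occurrence counting; the final pair scan only reads the counter.
-- The proved equivalence is about the RETURN value (neither program mutates its arguments).

-- ===== PORT A =====
def highest_affinity (site_list : List String) (user_list : List String) (time_list : List Int) : List String :=
  let sites : PySem.Dict String (List String) :=
    (PySem.List.pyRange 0 site_list.length 1).foldl (fun d n =>
      let s := PySem.List.pyGetD site_list n ""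
      let u := PySem.List.pyGetD user_list n ""
      let d := if d.contains s then d else d.insert s []
      d.insert s (d.getD s [] ++ [u])) PySem.Dict.empty
  let sites_items := sites.items
  let result : Int × List String :=
    (PySem.List.pyRange 0 sites.size 1).foldl (fun st i =>
      (PySem.List.pyRange (i+1) sites.size 1).foldl (fun (st : Int × List String) j =>
        let pi := PySem.List.pyGetD sites_items i ("", [])
        let pj := PySem.List.pyGetD sites_items j ("", [])
        let affinity_num : Int := ((PySem.Set.inter (PySem.Set.ofList pi.2) (PySem.Set.ofList pj.2)).length : Int)
        if st.1 < affinity_num then (affinity_num, PySem.List.sorted [pi.1, pj.1] (fun x => x) false)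
        else st) st)
      (0, ["a", "b"])
  [PySem.List.pyGetD result.2 0 "", PySem.List.pyGetD result.2 1 ""]

-- ===== PORT B =====
-- one fused pass: site→index dict, index→name list, user→distinct site indices, pair counter
def haStepB
    (st : PySem.Dict String Int × List String × PySem.Dict String (List Int) × PySem.Dict (Int × Int) Int)
    (p : String × String) :
    PySem.Dict String Int × List String × PySem.Dict String (List Int) × PySem.Dict (Int × Int) Int :=
  let (siteIndex, siteNames, userSites, counter) := st
  let (i, siteIndex, siteNames) :=
    match siteIndex.get? p.1 with
    | some i => (i, siteIndex, siteNames)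
    | none => ((siteNames.length : Int), siteIndex.insert p.1 (siteNames.length : Int), siteNames ++ [p.1])
  let seen := userSites.getD p.2 []
  if i ∈ seen then (siteIndex, siteNames, userSites, counter)
  else
    let counter := seen.foldl (fun c j =>
      let key := if j < i then (j, i) else (i, j)
      c.insert key (c.getD key 0 + 1)) counter
    (siteIndex, siteNames, userSites.insert p.2 (seen ++ [i]), counter)

def highest_affinity_alt (site_list : List String) (user_list : List String) (time_list : List Int) : List String :=
  let st := (site_list.zip user_list).foldl haStepB (PySem.Dict.empty, [], PySem.Dict.empty, PySem.Dict.empty)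
  let siteNames := st.2.1
  let counter := st.2.2.2
  let result : Int × List String :=
    (PySem.List.pyRange 0 siteNames.length 1).foldl (fun r i =>
      (PySem.List.pyRange (i+1) siteNames.length 1).foldl (fun (r : Int × List String) j =>
        let c := counter.getD (i, j) 0
        if r.1 < c then (c, PySem.List.sorted [PySem.List.pyGetD siteNames i "", PySem.List.pyGetD siteNames j ""] (fun x => x) false)
        else r) r)
      (0, ["a", "b"])
  [PySem.List.pyGetD result.2 0 "", PySem.List.pyGetD result.2 1 ""]

-- ===== PRECONDITION & SPEC =====
-- Pre_ excludes exactly the inputs where A raises IndexError: user_list[n] with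
-- n < len(site_list) but n ≥ len(user_list).
def Pre_highest_affinity (site_list : List String) (user_list : List String) (time_list : List Int) : Prop :=
  site_list.length ≤ user_list.length
instance (site_list : List String) (user_list : List String) (time_list : List Int) : Decidable (Pre_highest_affinity site_list user_list time_list) := by unfold Pre_highest_affinity; infer_instance

def pvWitness_highest_affinity : List String × List String × List Int :=
  (["g", "f", "g", "f"], ["u", "u", "v", "v"], [1, 2, 3, 4])

def Spec_highest_affinity (site_list : List String) (user_list : List String) (time_list : List Int) (out : List String) : Prop := out = highest_affinity_alt site_list user_list time_list
instance (site_list : List String) (user_list : List String) (time_list : List Int) (out : List String) : Decidable (Spec_highest_affinity site_list user_list time_list out) := by unfold Spec_highest_affinity; infer_instance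

-- ===== CLAIM (what is proved, stated in full; the proofs are below) =====
def Claim_equal_highest_affinity : Prop := ∀ (site_list : List String) (user_list : List String) (time_list : List Int), Dom_highest_affinity site_list user_list time_list → Pre_highest_affinity site_list user_list time_list → Spec_highest_affinity site_list user_list time_list (highest_affinity site_list user_list time_list)

-- ===== LEMMAS AND PROOFS =====

-- A's grouping step (one iteration of A's first loop)
def haStepA (d : PySem.Dict String (List String)) (p : String × String) : PySem.Dict String (List String) :=
  let d' := if d.contains p.1 then d else d.insert p.1 []
  d'.insert p.1 (d'.getD p.1 [] ++ [p.2])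

-- the invariant tying A's dict after a prefix of the input to B's four-component state
structure HAInv (d : PySem.Dict String (List String))
    (st : PySem.Dict String Int × List String × PySem.Dict String (List Int) × PySem.Dict (Int × Int) Int) : Prop where
  keys_eq : d.keys = st.2.1
  nodup : st.2.1.Nodup
  idx_eq : ∀ s : String, st.1.get? s = (st.2.1.idxOf? s).map (fun k => (k : Int))
  seen_nodup : ∀ u : String, (st.2.2.1.getD u []).Nodup
  seen_mem : ∀ (u : String) (k : Int), k ∈ st.2.2.1.getD u [] ↔
      ∃ i : Nat, i < st.2.1.length ∧ k = (i : Int) ∧ u ∈ d.getD (st.2.1.getD i "") []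
  cnt_eq : ∀ i j : Nat, i < j → j < st.2.1.length →
      st.2.2.2.getD ((i : Int), (j : Int)) 0 =
        ((PySem.Set.inter (PySem.Set.ofList (d.getD (st.2.1.getD i "") []))
                          (PySem.Set.ofList (d.getD (st.2.1.getD j "") []))).length : Int)
  cnt_zero : ∀ a b : Int, ¬ (0 ≤ a ∧ a < b ∧ b < (st.2.1.length : Int)) →
      st.2.2.2.getD (a, b) 0 = 0

-- generic helper lemmas
lemma count_nodup {α : Type} [DecidableEq α] (l : List α) (a : α) (h : l.Nodup) :
    l.count a = if a ∈ l then 1 else 0 := by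
  induction l with
  | nil => simp
  | cons x xs ih =>
    simp only [List.nodup_cons] at h
    rcases h with ⟨hx, hn⟩
    by_cases hax : a = x
    · subst hax
      simp [List.count_eq_zero.mpr hx]
    · simp [List.count_cons, hax, ih hn, Ne.symm hax]

lemma idxOf?_append_self (l : List String) (s : String) (h : s ∉ l) :
    (l ++ [s]).idxOf? s = some l.length := by
  induction l with
  | nil => simp [List.idxOf?_cons]
  | cons x xs ih =>
    simp only [List.mem_cons, not_or] at h
    simp [List.idxOf?_cons, Ne.symm h.1, ih h.2, beq_iff_eq]

lemma idxOf?_append_ne (l : List String) (s t : String) (h : t ≠ s) :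
    (l ++ [s]).idxOf? t = l.idxOf? t := by
  induction l with
  | nil => simp [List.idxOf?_cons, Ne.symm h]
  | cons x xs ih =>
    by_cases hx : x = t
    · simp [List.idxOf?_cons, hx]
    · simp only [List.cons_append, List.idxOf?_cons, beq_iff_eq, hx, if_false, ih]

lemma set_ofList_append (l : List String) (u : String) :
    PySem.Set.ofList (l ++ [u]) = if u ∈ l then PySem.Set.ofList l else PySem.Set.ofList l ++ [u] := by
  have h1 : PySem.Set.ofList (l ++ [u]) = PySem.Set.add (PySem.Set.ofList l) u := by
    simp [PySem.Set.ofList_eq_foldl, List.foldl_append]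
  by_cases hm : u ∈ l
  · have hc : PySem.Set.contains (PySem.Set.ofList l) u = true :=
      (PySem.Set.contains_iff _ _).mpr ((PySem.Set.mem_ofList l u).mpr hm)
    simp [h1, PySem.Set.add, hc, hm]
  · have hc : PySem.Set.contains (PySem.Set.ofList l) u = false := by
      rw [Bool.eq_false_iff]
      intro hc
      exact hm ((PySem.Set.mem_ofList l u).mp ((PySem.Set.contains_iff _ _).mp hc))
    simp [h1, PySem.Set.add, hc, hm]

lemma filter_or_len (s : List String) (q : String → Bool) (u : String) (hnd : s.Nodup) :
    (s.filter (fun x => q x || x == u)).length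
      = (s.filter q).length + (if u ∈ s ∧ q u = false then 1 else 0) := by
  induction s with
  | nil => simp
  | cons x xs ih =>
    simp only [List.nodup_cons] at hnd
    rcases hnd with ⟨hx, hn⟩
    by_cases hxu : x = u
    · subst hxu
      cases hq : q x
      · simp [List.filter_cons, hq, ih hn, hx]
      · simp [List.filter_cons, hq, ih hn, hx]
    · cases hq : q x
      · simp only [List.filter_cons, hq, Bool.false_or, beq_iff_eq, hxu, if_false]
        rw [ih hn]
        simp [List.mem_cons, Ne.symm hxu]
      · simp only [List.filter_cons, hq, Bool.true_or, if_true, List.length_cons, ih hn]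
        simp [List.mem_cons, Ne.symm hxu]
        split_ifs <;> omega

-- the pair-key normalisation used by B's inner counting loop
def haNorm (i : Int) (j : Int) : Int × Int := if j < i then (j, i) else (i, j)

lemma haNorm_inj (i : Int) : Function.Injective (haNorm i) := by
  intro a b hab
  unfold haNorm at hab
  split_ifs at hab <;> simp_all <;> omega

lemma counter_fold_getD (cnt : PySem.Dict (Int × Int) Int) (l : List Int) (i : Int) (q : Int × Int) :
    ((l.foldl (fun c j =>
        let key := if j < i then (j, i) else (i, j)
        c.insert key (c.getD key 0 + 1)) cnt).getD q 0)
      = cnt.getD q 0 + ((l.map (haNorm i)).count q : Int) := by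
  have h1 : (l.foldl (fun c j =>
        let key := if j < i then (j, i) else (i, j)
        c.insert key (c.getD key 0 + 1)) cnt)
      = ((l.map (haNorm i)).foldl (fun c k => c.insert k (c.getD k 0 + 1)) cnt) := by
    rw [List.foldl_map]
    rfl
  rw [h1, PySem.Dict.getD_foldl_insert_add_one]

-- intersection with one new element appended on the right / left
lemma inter_append_right_len (s t : List String) (u : String) (hs : s.Nodup) (hu : u ∉ t) :
    ((PySem.Set.inter s (t ++ [u])).length : Int)
      = ((PySem.Set.inter s t).length : Int) + (if u ∈ s then 1 else 0) := by
  have h1 : PySem.Set.inter s (t ++ [u]) = s.filter (fun x => PySem.Set.contains t x || x == u) := by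
    show s.filter _ = _
    apply List.filter_congr
    intro x _
    simp [PySem.Set.contains, Bool.beq_eq_decide_eq]
  have h2 : PySem.Set.contains t u = false := by
    rw [Bool.eq_false_iff]
    intro hc
    exact hu ((PySem.Set.contains_iff _ _).mp hc)
  have hrfl : PySem.Set.inter s t = s.filter (fun x => PySem.Set.contains t x) := rfl
  rw [h1, filter_or_len s _ u hs, h2, ← hrfl]
  push_cast
  split_ifs <;> simp_all
lemma inter_append_left_len (s t : List String) (u : String) :
    ((PySem.Set.inter (s ++ [u]) t).length : Int)
      = ((PySem.Set.inter s t).length : Int) + (if u ∈ t then 1 else 0) := by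
  have hrfl : ∀ w : List String, PySem.Set.inter w t = w.filter (fun x => PySem.Set.contains t x) := fun _ => rfl
  rw [hrfl, hrfl, List.filter_append]
  by_cases hm : u ∈ t
  · have : PySem.Set.contains t u = true := (PySem.Set.contains_iff _ _).mpr hm
    simp [this, hm]
  · have : PySem.Set.contains t u = false := by
      rw [Bool.eq_false_iff]; intro hc; exact hm ((PySem.Set.contains_iff _ _).mp hc)
    simp [this, hm]
lemma count_norm_mem (seen : List Int) (i j : Int) :
    (seen.map (haNorm i)).count (haNorm i j) = seen.count j :=
  List.count_map_of_injective seen (haNorm i) (haNorm_inj i) j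
lemma count_norm_zero (seen : List Int) (i : Int) (q : Int × Int) (hq1 : q.1 ≠ i) (hq2 : q.2 ≠ i) :
    (seen.map (haNorm i)).count q = 0 := by
  rw [List.count_eq_zero]
  intro hmem
  obtain ⟨j, _, hj⟩ := List.mem_map.mp hmem
  unfold haNorm at hj
  split_ifs at hj <;> rw [← hj] at hq1 hq2 <;> simp_all

lemma count_pairs_zero (seen : List Int) (i M a b : Int)
    (hj : ∀ j ∈ seen, 0 ≤ j ∧ j < M ∧ j ≠ i) (hi0 : 0 ≤ i) (hiM : i < M)
    (hbad : ¬ (0 ≤ a ∧ a < b ∧ b < M)) :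
    (seen.map (haNorm i)).count (a, b) = 0 := by
  rw [List.count_eq_zero]
  intro hmem
  obtain ⟨j, hjs, hje⟩ := List.mem_map.mp hmem
  obtain ⟨hj0, hjM, hjne⟩ := hj j hjs
  unfold haNorm at hje
  split_ifs at hje with hlt <;>
    (simp only [Prod.mk.injEq] at hje; obtain ⟨rfl, rfl⟩ := hje; exact hbad ⟨by omega, by omega, by omega⟩)

lemma haInv_empty : HAInv PySem.Dict.empty (PySem.Dict.empty, [], PySem.Dict.empty, PySem.Dict.empty) := by
  constructor
  · simp [PySem.Dict.keys_empty]
  · simp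
  · intro s
    simp [PySem.Dict.get?_empty]
  · intro u
    simp [PySem.Dict.getD_empty]
  · intro u k
    simp [PySem.Dict.getD_empty]
  · intro i j hij hj
    simp at hj
  · intro a b hb
    simp [PySem.Dict.getD_empty]

lemma haInv_step (d : PySem.Dict String (List String)) (st) (p : String × String)
    (h : HAInv d st) : HAInv (haStepA d p) (haStepB st p) := by
  obtain ⟨idx, names, us, cnt⟩ := st
  obtain ⟨s, u⟩ := p
  obtain ⟨hkeys, hnd, hidx, hsnd, hsmem, hceq, hczero⟩ := h
  simp only at hkeys hnd hidx hsnd hsmem hceq hczero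
  have husers : ∀ a : Nat, a < names.length →
      (((a : Int) ∈ us.getD u []) ↔ u ∈ d.getD (names.getD a "") []) := by
    intro a ha
    rw [hsmem u (a : Int)]
    constructor
    · rintro ⟨i, hi, hcast, hmem⟩
      have : i = a := by exact_mod_cast hcast.symm
      subst this
      exact hmem
    · intro hmem
      exact ⟨a, ha, rfl, hmem⟩
  have hAstep : haStepA d (s, u) = d.insert s (d.getD s [] ++ [u]) := by
    by_cases hc : d.contains s
    · simp [haStepA, hc]
    · simp only [haStepA, hc, if_neg, Bool.false_eq_true, if_false]
      rw [PySem.Dict.insert_insert_self]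
      have h1 : (d.insert s []).getD s [] = [] := by
        simp [PySem.Dict.getD_insert_self]
      have h2 : d.getD s [] = [] := PySem.Dict.getD_of_not_contains d [] (by simpa using hc)
      rw [h1, h2]
  by_cases hm : s ∈ names
  · -- s already has an index i₀
    obtain ⟨i₀, hio⟩ := Option.isSome_iff_exists.mp (List.isSome_idxOf?.mpr hm)
    obtain ⟨hi₀len, hgi₀, _⟩ := List.idxOf?_eq_some_iff.mp hio
    have hcont : d.contains s = true :=
      (PySem.Dict.contains_iff_mem_keys d s).mpr (by rw [hkeys]; exact hm)
    have hBidx : idx.get? s = some ((i₀ : Nat) : Int) := by rw [hidx s, hio]; rfl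
    have hnamesi₀ : names.getD i₀ "" = s := by rw [List.getD_eq_getElem names "" hi₀len, hgi₀]
    have hgetins : ∀ (t : String) (v : List String), (d.insert s v).getD t [] = if t = s then v else d.getD t [] :=
      fun t v => PySem.Dict.getD_insert d s t v []
    have hinj : ∀ (a b : Nat) (_ : a < names.length) (_ : b < names.length),
        names.getD a "" = names.getD b "" → a = b := by
      intro a b ha hb he
      rw [List.getD_eq_getElem names "" ha, List.getD_eq_getElem names "" hb] at he
      exact (List.Nodup.getElem_inj_iff hnd).mp he
    by_cases hseen : ((i₀ : Nat) : Int) ∈ us.getD u []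
    · -- user already visited this site: B leaves everything unchanged
      have huin : u ∈ d.getD s [] := by
        have := (husers i₀ hi₀len).mp hseen
        rwa [hnamesi₀] at this
      have hBstep : haStepB (idx, names, us, cnt) (s, u) = (idx, names, us, cnt) := by
        simp [haStepB, hBidx, hseen]
      rw [hAstep, hBstep]
      have hmemiff : ∀ (i : Nat), i < names.length → ∀ u' : String,
          (u' ∈ (d.insert s (d.getD s [] ++ [u])).getD (names.getD i "") [] ↔
            u' ∈ d.getD (names.getD i "") []) := by
        intro i hi u'
        rw [hgetins]
        split_ifs with hcase
        · rw [hcase]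
          simp only [List.mem_append, List.mem_singleton]
          constructor
          · rintro (h | h)
            · exact h
            · rw [h]; exact huin
          · intro h; left; exact h
        · exact Iff.rfl
      have hsets : ∀ (i : Nat), i < names.length →
          PySem.Set.ofList ((d.insert s (d.getD s [] ++ [u])).getD (names.getD i "") []) =
            PySem.Set.ofList (d.getD (names.getD i "") []) := by
        intro i hi
        rw [hgetins]
        split_ifs with hcase
        · rw [hcase, set_ofList_append, if_pos huin]
        · rfl
      refine ⟨?_, hnd, hidx, hsnd, ?_, ?_, hczero⟩
      · rw [PySem.Dict.keys_insert_of_contains d _ hcont]; exact hkeys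
      · intro u' k
        rw [hsmem u' k]
        apply exists_congr
        intro i
        by_cases hi : i < names.length
        · simp only [hi, true_and, hmemiff i hi u']
        · simp [hi]
      · intro a b hab hb
        rw [hsets a (lt_trans hab hb), hsets b hb]
        exact hceq a b hab hb
    · -- new site for this user
      have hunotin : u ∉ d.getD s [] := by
        intro hin
        exact hseen ((husers i₀ hi₀len).mpr (by rwa [hnamesi₀]))
      have hBstep : haStepB (idx, names, us, cnt) (s, u) =
          (idx, names, us.insert u (us.getD u [] ++ [((i₀ : Nat) : Int)]),
           (us.getD u []).foldl (fun c j =>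
             let key := if j < ((i₀ : Nat) : Int) then (j, ((i₀ : Nat) : Int)) else (((i₀ : Nat) : Int), j)
             c.insert key (c.getD key 0 + 1)) cnt) := by
        simp [haStepB, hBidx, hseen]
      rw [hAstep, hBstep]
      have hgetus : ∀ u' : String, (us.insert u (us.getD u [] ++ [((i₀ : Nat) : Int)])).getD u' [] =
          if u' = u then us.getD u [] ++ [((i₀ : Nat) : Int)] else us.getD u' [] :=
        fun u' => PySem.Dict.getD_insert us u u' _ []
      have hnamesne : ∀ (i : Nat), i < names.length → i ≠ i₀ → names.getD i "" ≠ s := by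
        intro i hi hne he
        exact hne (hinj i i₀ hi hi₀len (by rw [he, hnamesi₀]))
      have hsets : ∀ (i : Nat), i < names.length → i ≠ i₀ →
          (d.insert s (d.getD s [] ++ [u])).getD (names.getD i "") [] = d.getD (names.getD i "") [] := by
        intro i hi hne
        rw [hgetins, if_neg (hnamesne i hi hne)]
      have hsetI : PySem.Set.ofList ((d.insert s (d.getD s [] ++ [u])).getD (names.getD i₀ "") []) =
          PySem.Set.ofList (d.getD (names.getD i₀ "") []) ++ [u] := by
        rw [hgetins, if_pos hnamesi₀, hnamesi₀, set_ofList_append, if_neg hunotin]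
      refine ⟨?_, hnd, hidx, ?_, ?_, ?_, ?_⟩
      · rw [PySem.Dict.keys_insert_of_contains d _ hcont]; exact hkeys
      · -- seen_nodup
        intro u'
        rw [hgetus u']
        split_ifs with hc
        · simp only [List.nodup_append, List.nodup_singleton, true_and]
          constructor
          · exact hsnd u
          · intro a ha b hb
            rw [List.mem_singleton] at hb
            subst hb
            intro hae
            exact hseen (hae ▸ ha)
        · exact hsnd u'
      · -- seen_mem
        intro u' k
        rw [hgetus u']
        split_ifs with hu'
        · subst hu'
          simp only [List.mem_append, List.mem_singleton]
          constructor
          · rintro (hk | hk)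
            · obtain ⟨i, hi, hkc, hmem⟩ := (hsmem u' k).mp hk
              refine ⟨i, hi, hkc, ?_⟩
              rw [hgetins]
              split_ifs with hcase
              · rw [hcase] at hmem
                simp [hmem]
              · exact hmem
            · refine ⟨i₀, hi₀len, hk, ?_⟩
              rw [hgetins, if_pos hnamesi₀]
              simp
          · rintro ⟨i, hi, hk, hmem⟩
            by_cases hcase : names.getD i "" = s
            · have : i = i₀ := hinj i i₀ hi hi₀len (by rw [hcase, hnamesi₀])
              subst this
              right
              exact hk
            · rw [hgetins, if_neg hcase] at hmem
              left
              exact (hsmem u' k).mpr ⟨i, hi, hk, hmem⟩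
        · rw [hsmem u' k]
          apply exists_congr
          intro i
          by_cases hi : i < names.length
          · have : (u' ∈ (d.insert s (d.getD s [] ++ [u])).getD (names.getD i "") [] ↔
                u' ∈ d.getD (names.getD i "") []) := by
              rw [hgetins]
              split_ifs with hcase
              · rw [hcase]
                simp [hu']
              · exact Iff.rfl
            simp only [hi, true_and, this]
          · simp [hi]
      · -- cnt_eq
        intro a b hab hb
        rw [counter_fold_getD]
        have hbN : ((b : Nat) : Int) < ((names.length : Nat) : Int) := by exact_mod_cast hb
        by_cases hbi : b = i₀
        · subst hbi
          have hane : a ≠ b := by omega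
          have hkey : ((((a : Nat)) : Int), ((b : Nat) : Int)) = haNorm ((b : Nat) : Int) ((a : Nat) : Int) := by
            unfold haNorm
            rw [if_pos (by exact_mod_cast hab)]
          rw [hnamesi₀] at hsetI
          rw [hsets a (lt_trans hab hb) hane, hnamesi₀, hsetI]
          rw [inter_append_right_len _ _ _ (PySem.Set.nodup_ofList _) (by
            rw [PySem.Set.mem_ofList]; exact hunotin)]
          rw [hkey, count_norm_mem, count_nodup _ _ (hsnd u), ← hkey]
          have := hceq a b hab hi₀len
          rw [hnamesi₀] at this
          rw [this]
          have hmemiff : (u ∈ PySem.Set.ofList (d.getD (names.getD a "") [])) ↔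
              ((a : Nat) : Int) ∈ us.getD u [] := by
            rw [PySem.Set.mem_ofList]
            exact (husers a (lt_trans hab hb)).symm
          by_cases hu : ((a : Nat) : Int) ∈ us.getD u []
          · simp only [if_pos hu, if_pos (hmemiff.mpr hu)]
            push_cast
            ring
          · simp only [if_neg hu, if_neg (fun hx => hu (hmemiff.mp hx))]
            push_cast
            ring
        · by_cases hai : a = i₀
          · subst hai
            have hkey : (((a : Nat) : Int), ((b : Nat) : Int)) = haNorm ((a : Nat) : Int) ((b : Nat) : Int) := by
              unfold haNorm
              rw [if_neg (by push_cast; omega)]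
            rw [hnamesi₀] at hsetI
            rw [hsets b hb (by omega), hnamesi₀, hsetI]
            rw [inter_append_left_len]
            rw [hkey, count_norm_mem, count_nodup _ _ (hsnd u), ← hkey]
            have := hceq a b hab hb
            rw [hnamesi₀] at this
            rw [this]
            have hmemiff : (u ∈ PySem.Set.ofList (d.getD (names.getD b "") [])) ↔
                ((b : Nat) : Int) ∈ us.getD u [] := by
              rw [PySem.Set.mem_ofList]
              exact (husers b hb).symm
            by_cases hu : ((b : Nat) : Int) ∈ us.getD u []
            · simp only [if_pos hu, if_pos (hmemiff.mpr hu)]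
              push_cast
              ring
            · simp only [if_neg hu, if_neg (fun hx => hu (hmemiff.mp hx))]
              push_cast
              ring
          · rw [hsets a (lt_trans hab hb) hai, hsets b hb hbi]
            rw [count_norm_zero _ _ _ (by simp; omega) (by simp; omega)]
            rw [hceq a b hab hb]
            simp
      · -- cnt_zero
        intro a b hbad
        rw [counter_fold_getD, hczero a b hbad]
        rw [count_pairs_zero (us.getD u []) _ ((names.length : Nat) : Int) a b ?_ (by positivity) (by exact_mod_cast hi₀len) hbad]
        · simp
        · intro j hj
          obtain ⟨i, hi, hkc, _⟩ := (hsmem u j).mp hj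
          subst hkc
          refine ⟨by positivity, by exact_mod_cast hi, ?_⟩
          intro he
          rw [he] at hj
          exact hseen hj
  · -- brand-new site
    have hio : names.idxOf? s = none := by
      rw [← Option.not_isSome_iff_eq_none]
      simp [List.isSome_idxOf?, hm]
    have hcont : d.contains s = false := by
      rw [Bool.eq_false_iff]
      intro hc
      exact hm (by rw [← hkeys]; exact (PySem.Dict.contains_iff_mem_keys d s).mp hc)
    have hBidx : idx.get? s = none := by rw [hidx s, hio]; rfl
    have hdget : d.getD s [] = [] := PySem.Dict.getD_of_not_contains d [] hcont
    have hfresh : ((names.length : Nat) : Int) ∉ us.getD u [] := by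
      intro hin
      obtain ⟨i, hi, hcast, _⟩ := (hsmem u _).mp hin
      have : names.length = i := by exact_mod_cast hcast
      omega
    have hBstep : haStepB (idx, names, us, cnt) (s, u) =
        (idx.insert s ((names.length : Nat) : Int), names ++ [s],
         us.insert u (us.getD u [] ++ [((names.length : Nat) : Int)]),
         (us.getD u []).foldl (fun c j =>
           let key := if j < ((names.length : Nat) : Int) then (j, ((names.length : Nat) : Int)) else (((names.length : Nat) : Int), j)
           c.insert key (c.getD key 0 + 1)) cnt) := by
      simp [haStepB, hBidx, hfresh]
    rw [hAstep, hdget, hBstep]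
    simp only [List.nil_append]
    have hLen : (names ++ [s]).length = names.length + 1 := by simp
    have hget' : ∀ t : String, (d.insert s [u]).getD t [] = if t = s then [u] else d.getD t [] :=
      fun t => PySem.Dict.getD_insert d s t [u] []
    have hgetus : ∀ u' : String, (us.insert u (us.getD u [] ++ [((names.length : Nat) : Int)])).getD u' [] =
        if u' = u then us.getD u [] ++ [((names.length : Nat) : Int)] else us.getD u' [] :=
      fun u' => PySem.Dict.getD_insert us u u' _ []
    have hnames1 : ∀ i : Nat, i < names.length → (names ++ [s]).getD i "" = names.getD i "" := by
      intro i hi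
      rw [List.getD_eq_getElem _ "" (by simp; omega), List.getD_eq_getElem _ "" hi]
      exact List.getElem_append_left hi
    have hnamesL : (names ++ [s]).getD names.length "" = s := by
      rw [List.getD_eq_getElem _ "" (by simp)]
      simp
    have hne : ∀ i : Nat, i < names.length → names.getD i "" ≠ s := by
      intro i hi he
      apply hm
      rw [← he, List.getD_eq_getElem _ "" hi]
      exact List.getElem_mem hi
    have hinterNil : ∀ w : List String, PySem.Set.inter w ([] : List String) = [] := by
      intro w
      show w.filter _ = []
      simp [PySem.Set.contains]
    refine ⟨?_, ?_, ?_, ?_, ?_, ?_, ?_⟩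
    · rw [PySem.Dict.keys_insert_of_not_contains d [u] hcont, hkeys]
    · simp only [List.nodup_append, List.nodup_singleton, true_and]
      constructor
      · exact hnd
      · intro a ha b hb
        rw [List.mem_singleton] at hb
        subst hb
        intro hae
        exact hm (hae ▸ ha)
    · intro t
      by_cases ht : t = s
      · subst ht
        rw [PySem.Dict.get?_insert_self, idxOf?_append_self names t hm]
        rfl
      · rw [PySem.Dict.get?_insert_of_ne, idxOf?_append_ne names s t ht]
        · exact hidx t
        · exact ht
    · intro u'
      rw [hgetus u']
      split_ifs with hc
      · simp only [List.nodup_append, List.nodup_singleton, true_and]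
        constructor
        · exact hsnd u
        · intro a ha b hb
          rw [List.mem_singleton] at hb
          subst hb
          intro hae
          exact hfresh (hae ▸ ha)
      · exact hsnd u'
    · intro u' k
      rw [hgetus u']
      split_ifs with hu'
      · subst hu'
        simp only [List.mem_append, List.mem_singleton]
        constructor
        · rintro (hk | hk)
          · obtain ⟨i, hi, hkc, hmem⟩ := (hsmem u' k).mp hk
            refine ⟨i, by simp; omega, hkc, ?_⟩
            rw [hnames1 i hi, hget', if_neg (hne i hi)]
            exact hmem
          · refine ⟨names.length, by simp, hk, ?_⟩
            rw [hnamesL, hget', if_pos rfl]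
            simp
        · rintro ⟨i, hi, hk, hmem⟩
          rw [hLen] at hi
          by_cases hiL : i = names.length
          · subst hiL
            right
            exact hk
          · have hi' : i < names.length := by omega
            rw [hnames1 i hi', hget', if_neg (hne i hi')] at hmem
            left
            exact (hsmem u' k).mpr ⟨i, hi', hk, hmem⟩
      · rw [hsmem u' k]
        constructor
        · rintro ⟨i, hi, hk, hmem⟩
          refine ⟨i, by simp; omega, hk, ?_⟩
          rw [hnames1 i hi, hget', if_neg (hne i hi)]
          exact hmem
        · rintro ⟨i, hi, hk, hmem⟩
          rw [hLen] at hi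
          by_cases hiL : i = names.length
          · subst hiL
            rw [hnamesL, hget', if_pos rfl] at hmem
            rw [List.mem_singleton] at hmem
            exact absurd hmem hu'
          · have hi' : i < names.length := by omega
            rw [hnames1 i hi', hget', if_neg (hne i hi')] at hmem
            exact ⟨i, hi', hk, hmem⟩
    · -- cnt_eq
      intro a b hab hb
      rw [counter_fold_getD]
      rw [hLen] at hb
      by_cases hbL : b = names.length
      · subst hbL
        have haL : a < names.length := hab
        have h0 : cnt.getD (((a : Nat) : Int), ((names.length : Nat) : Int)) 0 = 0 :=
          hczero _ _ (by push_cast; omega)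
        rw [h0]
        have hkey : (((a : Nat) : Int), ((names.length : Nat) : Int)) =
            haNorm ((names.length : Nat) : Int) ((a : Nat) : Int) := by
          unfold haNorm
          rw [if_pos (by exact_mod_cast hab)]
        rw [hkey, count_norm_mem, count_nodup _ _ (hsnd u)]
        rw [hnames1 a haL, hnamesL]
        simp only [hget']
        rw [if_neg (hne a haL)]
        simp only [if_true]
        have hofu : PySem.Set.ofList [u] = ([] : List String) ++ [u] := rfl
        rw [hofu, inter_append_right_len _ _ _ (PySem.Set.nodup_ofList _) (List.not_mem_nil),
          hinterNil]
        have hmemiff : (u ∈ PySem.Set.ofList (d.getD (names.getD a "") [])) ↔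
            ((a : Nat) : Int) ∈ us.getD u [] := by
          rw [PySem.Set.mem_ofList]
          exact (husers a haL).symm
        by_cases hu : ((a : Nat) : Int) ∈ us.getD u []
        · simp only [if_pos hu, if_pos (hmemiff.mpr hu)]
          simp
        · simp only [if_neg hu, if_neg (fun hx => hu (hmemiff.mp hx))]
          simp
      · have hb' : b < names.length := by omega
        rw [hnames1 a (by omega), hnames1 b hb']
        simp only [hget']
        rw [if_neg (hne a (by omega)), if_neg (hne b hb')]
        rw [hceq a b hab hb']
        rw [count_norm_zero _ _ _ (by simp; omega) (by simp; omega)]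
        simp
    · -- cnt_zero
      intro a b hbad
      have hbad' : ¬ (0 ≤ a ∧ a < b ∧ b < (names.length : Int)) := by
        rintro ⟨h1, h2, h3⟩
        exact hbad ⟨h1, h2, by simp; omega⟩
      rw [counter_fold_getD, hczero a b hbad']
      rw [count_pairs_zero (us.getD u []) ((names.length : Nat) : Int)
        (((names.length + 1 : Nat) : Int)) a b ?_ (by positivity) (by push_cast; omega)
        (by rw [hLen] at hbad; push_cast at hbad ⊢; exact hbad)]
      · simp
      · intro j hj
        obtain ⟨i, hi, hkc, _⟩ := (hsmem u j).mp hj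
        subst hkc
        refine ⟨by positivity, by push_cast; omega, ?_⟩
        intro he
        rw [he] at hj
        exact hfresh hj

lemma haInv_foldl (l : List (String × String)) :
    HAInv (l.foldl haStepA PySem.Dict.empty)
          (l.foldl haStepB (PySem.Dict.empty, [], PySem.Dict.empty, PySem.Dict.empty)) := by
  induction l using List.reverseRecOn with
  | nil => exact haInv_empty
  | append_singleton l p ih => simpa [List.foldl_append] using haInv_step _ _ p ih

-- A's index loop over range(len(site_list)) is the fold of haStepA over zip site_list user_list
lemma haFoldA_eq (site_list user_list : List String) (h : site_list.length ≤ user_list.length) :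
    (PySem.List.pyRange 0 site_list.length 1).foldl (fun d n =>
      let s := PySem.List.pyGetD site_list n ""
      let u := PySem.List.pyGetD user_list n ""
      let d := if d.contains s then d else d.insert s []
      d.insert s (d.getD s [] ++ [u])) PySem.Dict.empty
    = (site_list.zip user_list).foldl haStepA PySem.Dict.empty := by
  have key : ∀ k : Nat, k ≤ site_list.length →
      (PySem.List.pyRange 0 (k : Int) 1).foldl (fun d n =>
        let s := PySem.List.pyGetD site_list n ""
        let u := PySem.List.pyGetD user_list n ""
        let d := if d.contains s then d else d.insert s []
        d.insert s (d.getD s [] ++ [u])) PySem.Dict.empty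
      = ((site_list.zip user_list).take k).foldl haStepA PySem.Dict.empty := by
    intro k
    induction k with
    | zero => intro _; simp [PySem.List.pyRange_one_eq_nil]
    | succ k ih =>
      intro hk
      have hk' : k < site_list.length := by omega
      have hku : k < user_list.length := by omega
      have hkz : k < (site_list.zip user_list).length := by
        simp [List.length_zip]; omega
      have hr : (PySem.List.pyRange 0 ((k + 1 : Nat) : Int) 1)
          = PySem.List.pyRange 0 (k : Int) 1 ++ [(k : Int)] := by
        push_cast
        exact PySem.List.pyRange_one_succ_right (by positivity)
      rw [hr, List.foldl_append, ih (by omega)]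
      have ht : (site_list.zip user_list).take (k + 1)
          = (site_list.zip user_list).take k ++ [(site_list[k], user_list[k])] := by
        rw [List.take_add_one]
        have hz : (site_list.zip user_list)[k]? = some (site_list[k], user_list[k]) := by
          rw [List.getElem?_eq_getElem hkz]
          simp [List.getElem_zip]
        rw [hz]
        simp
      rw [ht, List.foldl_append]
      simp only [List.foldl_cons, List.foldl_nil]
      have hgs : PySem.List.pyGetD site_list (k : Int) "" = site_list[k] := by
        simp [PySem.List.pyGetD_natCast, List.getElem?_eq_getElem hk']
      have hgu : PySem.List.pyGetD user_list (k : Int) "" = user_list[k] := by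
        rw [PySem.List.pyGetD_natCast]
        simp [List.getElem?_eq_getElem hku]
      simp only [hgs, hgu, haStepA]
  have := key site_list.length le_rfl
  rw [List.take_of_length_le (by simp [List.length_zip])] at this
  exact this


lemma haSelect_eq (d : PySem.Dict String (List String))
    (names : List String) (cnt : PySem.Dict (Int × Int) Int)
    (hkeys : d.keys = names) (hnd : names.Nodup)
    (hcnt : ∀ i j : Nat, i < j → j < names.length →
      cnt.getD ((i : Int), (j : Int)) 0 =
        ((PySem.Set.inter (PySem.Set.ofList (d.getD (names.getD i "") []))
                          (PySem.Set.ofList (d.getD (names.getD j "") []))).length : Int)) :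
    ((PySem.List.pyRange 0 d.size 1).foldl (fun st i =>
      (PySem.List.pyRange (i+1) d.size 1).foldl (fun (st : Int × List String) j =>
        let pi := PySem.List.pyGetD d.items i ("", [])
        let pj := PySem.List.pyGetD d.items j ("", [])
        let affinity_num : Int := ((PySem.Set.inter (PySem.Set.ofList pi.2) (PySem.Set.ofList pj.2)).length : Int)
        if st.1 < affinity_num then (affinity_num, PySem.List.sorted [pi.1, pj.1] (fun x => x) false)
        else st) st)
      (0, ["a", "b"]))
    = ((PySem.List.pyRange 0 names.length 1).foldl (fun r i =>
      (PySem.List.pyRange (i+1) names.length 1).foldl (fun (r : Int × List String) j =>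
        let c := cnt.getD (i, j) 0
        if r.1 < c then (c, PySem.List.sorted [PySem.List.pyGetD names i "", PySem.List.pyGetD names j ""] (fun x => x) false)
        else r) r)
      (0, ["a", "b"])) := by
  have hknd : d.keys.Nodup := by rw [hkeys]; exact hnd
  have hitems : d.items = names.map (fun k => (k, d.getD k [])) := by
    rw [← hkeys]; exact PySem.Dict.items_eq_map_keys d hknd []
  have hS : d.size = (names.length : Int) := by
    show (d.items.length : Int) = _
    rw [hitems]; simp
  rw [hS]
  apply PySem.List.foldl_congr_mem
  intro acc i hi
  obtain ⟨hi0, hiS⟩ := PySem.List.mem_pyRange_one.mp hi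
  apply PySem.List.foldl_congr_mem
  intro r j hj
  obtain ⟨hj1, hjS⟩ := PySem.List.mem_pyRange_one.mp hj
  have hj0 : (0 : Int) ≤ j := by omega
  have hiN : i.toNat < names.length := by omega
  have hjN : j.toNat < names.length := by omega
  have hijN : i.toNat < j.toNat := by omega
  have hgi : PySem.List.pyGetD d.items i ("", []) = (names[i.toNat], d.getD names[i.toNat] []) := by
    rw [PySem.List.pyGetD_eq_getElem _ _ hi0 (by simp [hitems]; omega)]
    simp [hitems]
  have hgj : PySem.List.pyGetD d.items j ("", []) = (names[j.toNat], d.getD names[j.toNat] []) := by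
    rw [PySem.List.pyGetD_eq_getElem _ _ hj0 (by simp [hitems]; omega)]
    simp [hitems]
  have hni : PySem.List.pyGetD names i "" = names[i.toNat] := by
    rw [PySem.List.pyGetD_eq_getElem _ _ hi0 (by omega)]
  have hnj : PySem.List.pyGetD names j "" = names[j.toNat] := by
    rw [PySem.List.pyGetD_eq_getElem _ _ hj0 (by omega)]
  have hc : cnt.getD (i, j) 0 =
      ((PySem.Set.inter (PySem.Set.ofList (d.getD names[i.toNat] []))
                        (PySem.Set.ofList (d.getD names[j.toNat] []))).length : Int) := by
    have := hcnt i.toNat j.toNat hijN hjN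
    rw [List.getD_eq_getElem names "" hiN, List.getD_eq_getElem names "" hjN] at this
    rwa [Int.toNat_of_nonneg hi0, Int.toNat_of_nonneg hj0] at this
  simp only [hgi, hgj, hni, hnj, hc]


-- ===== VERDICT (by name: the statement is the Claim_ definition above) =====
theorem highest_affinity_spec : Claim_equal_highest_affinity := by
  intro site_list user_list time_list _ hpre
  unfold Spec_highest_affinity
  have hd := haFoldA_eq site_list user_list hpre
  have inv := haInv_foldl (site_list.zip user_list)
  have hsel := haSelect_eq ((site_list.zip user_list).foldl haStepA PySem.Dict.empty)
      ((site_list.zip user_list).foldl haStepB (PySem.Dict.empty, [], PySem.Dict.empty, PySem.Dict.empty)).2.1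
      ((site_list.zip user_list).foldl haStepB (PySem.Dict.empty, [], PySem.Dict.empty, PySem.Dict.empty)).2.2.2
      inv.keys_eq inv.nodup inv.cnt_eq
  simp only [highest_affinity, highest_affinity_alt, hd, hsel]
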